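-- pv_equiv track=rewrite | github.com/Pederbs/INGT2300 | drit/functions.py | findCapacityPrice
-- ===== SOURCE A (Python) =====
-- def getCapacityLink(maxCapacity):
--     value= 0
--     if maxCapacity < 2: value= 1
--     elif maxCapacity >= 2 and maxCapacity < 5: value= 2
--     elif maxCapacity >= 5 and maxCapacity < 10: value= 3
--     elif maxCapacity >= 10 and maxCapacity < 15: value= 4
--     elif maxCapacity >= 15 and maxCapacity < 20: value= 5
--     elif maxCapacity >= 20 and maxCapacity < 25: value= 6
--     elif maxCapacity >= 25 and maxCapacity < 50: value= 7
--     elif maxCapacity >= 50 and maxCapacity < 75: value= 8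
--     elif maxCapacity >= 75 and maxCapacity < 100: value= 9
--     elif maxCapacity >= 100: value= 10
--
--     # Trekker fra 1 for at det skal passe med index i kapasitetsleddlisten
--     index = value - 1
--     return index
--
-- def findCapacityPrice(consumptionList, capacityList):
--     capacity = 0
--     for j in consumptionList:
--         if j > capacity:
--             capacity = j
--     newLink = getCapacityLink(capacity)
--     newPrice = capacityList[newLink]
--     return newPrice
-- ===== SOURCE B (Python) =====
-- def findCapacityPrice(consumptionList, capacityList):
--     index = 0
--     for tier in (2, 5, 10, 15, 20, 25, 50, 75, 100):
--         if not any(j >= tier for j in consumptionList):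
--             break
--         index += 1
--     return capacityList[index]
-- ===== Notes on version B (the rewrite author's own statement) =====
-- stated objective: alternative
-- what changed: B never computes the maximum: it walks the sorted tier thresholds and advances the price index while any consumption value reaches the tier, breaking at the first unreachable tier, instead of a running-max loop followed by a ten-branch if/elif cascade.
import Mathlib
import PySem

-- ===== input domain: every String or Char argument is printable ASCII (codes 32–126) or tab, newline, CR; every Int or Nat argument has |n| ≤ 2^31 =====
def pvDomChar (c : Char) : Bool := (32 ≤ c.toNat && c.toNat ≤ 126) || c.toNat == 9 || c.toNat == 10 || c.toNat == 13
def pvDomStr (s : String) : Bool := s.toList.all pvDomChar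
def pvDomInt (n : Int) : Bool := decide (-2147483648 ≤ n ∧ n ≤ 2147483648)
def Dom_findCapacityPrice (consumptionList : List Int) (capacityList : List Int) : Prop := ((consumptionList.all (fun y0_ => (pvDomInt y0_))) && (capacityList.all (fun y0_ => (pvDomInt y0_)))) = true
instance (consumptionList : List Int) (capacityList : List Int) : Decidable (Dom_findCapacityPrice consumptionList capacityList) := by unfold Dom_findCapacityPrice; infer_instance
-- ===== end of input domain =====

-- B never computes the maximum: it walks the sorted tier thresholds, advancing the price
-- index while any consumption value reaches the tier (objective: alternative).

-- ===== PORT A =====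
def getCapacityLink (maxCapacity : Int) : Int :=
  let value : Int :=
    if maxCapacity < 2 then 1
    else if maxCapacity ≥ 2 ∧ maxCapacity < 5 then 2
    else if maxCapacity ≥ 5 ∧ maxCapacity < 10 then 3
    else if maxCapacity ≥ 10 ∧ maxCapacity < 15 then 4
    else if maxCapacity ≥ 15 ∧ maxCapacity < 20 then 5
    else if maxCapacity ≥ 20 ∧ maxCapacity < 25 then 6
    else if maxCapacity ≥ 25 ∧ maxCapacity < 50 then 7
    else if maxCapacity ≥ 50 ∧ maxCapacity < 75 then 8
    else if maxCapacity ≥ 75 ∧ maxCapacity < 100 then 9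
    else if maxCapacity ≥ 100 then 10
    else 0
  value - 1

def findCapacityPrice (consumptionList : List Int) (capacityList : List Int) : Int :=
  let capacity := consumptionList.foldl (fun c j => if j > c then j else c) 0
  let newLink := getCapacityLink capacity
  (PySem.List.pyGet? capacityList newLink).getD 0   -- Pre_ guarantees `some`

-- ===== PORT B =====
-- the tier walk with early break: counts leading tiers some consumption value reaches
def pvTierWalk (cs : List Int) : List Int → Int
  | [] => 0
  | t :: ts => if cs.any (fun j => decide (t ≤ j)) then 1 + pvTierWalk cs ts else 0

def findCapacityPrice_alt (consumptionList : List Int) (capacityList : List Int) : Int :=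
  let index := pvTierWalk consumptionList [2, 5, 10, 15, 20, 25, 50, 75, 100]
  (PySem.List.pyGet? capacityList index).getD 0   -- Pre_ guarantees `some`

-- ===== PRECONDITION & SPEC =====
-- Pre_ excludes exactly the inputs on which A raises IndexError: capacityList shorter than
-- the price tier of the maximal consumption (B raises there too).
def pvCapacityOf (cs : List Int) : Int := cs.foldl max 0
def Pre_findCapacityPrice (consumptionList : List Int) (capacityList : List Int) : Prop :=
  ([2, 5, 10, 15, 20, 25, 50, 75, 100] : List Int).countP (fun t => t ≤ pvCapacityOf consumptionList) < capacityList.length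
instance (consumptionList : List Int) (capacityList : List Int) : Decidable (Pre_findCapacityPrice consumptionList capacityList) := by unfold Pre_findCapacityPrice; infer_instance

def pvWitness_findCapacityPrice : List Int × List Int := ([3, 1], [10, 20, 30])

def Spec_findCapacityPrice (consumptionList : List Int) (capacityList : List Int) (out : Int) : Prop := out = findCapacityPrice_alt consumptionList capacityList
instance (consumptionList : List Int) (capacityList : List Int) (out : Int) : Decidable (Spec_findCapacityPrice consumptionList capacityList out) := by unfold Spec_findCapacityPrice; infer_instance

-- ===== CLAIM (what is proved, stated in full; the proofs are below) =====
def Claim_equal_findCapacityPrice : Prop := ∀ (consumptionList : List Int) (capacityList : List Int), Dom_findCapacityPrice consumptionList capacityList → Pre_findCapacityPrice consumptionList capacityList → Spec_findCapacityPrice consumptionList capacityList (findCapacityPrice consumptionList capacityList)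

-- ===== LEMMAS AND PROOFS =====

-- A's running-max step is Int's max.
theorem pvStep_eq_max : (fun (c j : Int) => if j > c then j else c) = max := by
  funext c j
  simp only [gt_iff_lt, max_comm c j, max_def]
  split_ifs <;> omega

theorem pvLe_foldl_max (t a : Int) (cs : List Int) :
    t ≤ cs.foldl max a ↔ t ≤ a ∨ ∃ j ∈ cs, t ≤ j := by
  induction cs generalizing a with
  | nil => simp
  | cons x xs ih =>
    simp only [List.foldl_cons, ih, le_max_iff, List.mem_cons]
    constructor
    · rintro ((h | h) | ⟨j, hj, hle⟩)
      · exact Or.inl h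
      · exact Or.inr ⟨x, Or.inl rfl, h⟩
      · exact Or.inr ⟨j, Or.inr hj, hle⟩
    · rintro (h | ⟨j, (rfl | hj), hle⟩)
      · exact Or.inl (Or.inl h)
      · exact Or.inl (Or.inr hle)
      · exact Or.inr ⟨j, hj, hle⟩

-- for a positive tier, "some element reaches it" = "the clamped max reaches it"
theorem pvAny_eq (t : Int) (ht : 0 < t) (cs : List Int) :
    (cs.any (fun j => decide (t ≤ j))) = decide (t ≤ pvCapacityOf cs) := by
  rw [Bool.eq_iff_iff]
  simp only [List.any_eq_true, decide_eq_true_eq, pvCapacityOf, pvLe_foldl_max]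
  constructor
  · rintro ⟨j, hj, hle⟩; exact Or.inr ⟨j, hj, hle⟩
  · rintro (h | h)
    · omega
    · exact h

theorem pvWalk_cons (cs : List Int) (t : Int) (ts : List Int) :
    pvTierWalk cs (t :: ts) = if cs.any (fun j => decide (t ≤ j)) then 1 + pvTierWalk cs ts else 0 := rfl

theorem pvWalk_nil (cs : List Int) : pvTierWalk cs [] = 0 := rfl

-- getCapacityLink with its let zeta-reduced
theorem pvLink_def (M : Int) : getCapacityLink M =
    (if M < 2 then 1
     else if M ≥ 2 ∧ M < 5 then 2
     else if M ≥ 5 ∧ M < 10 then 3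
     else if M ≥ 10 ∧ M < 15 then 4
     else if M ≥ 15 ∧ M < 20 then 5
     else if M ≥ 20 ∧ M < 25 then 6
     else if M ≥ 25 ∧ M < 50 then 7
     else if M ≥ 50 ∧ M < 75 then 8
     else if M ≥ 75 ∧ M < 100 then 9
     else if M ≥ 100 then 10
     else 0) - 1 := rfl

-- the Int-level comparison chain equals A's cascade (10-interval case analysis)
theorem pvChain_eq_link (M : Int) :
    (if 2 ≤ M then 1 + (if 5 ≤ M then 1 + (if 10 ≤ M then 1 + (if 15 ≤ M then 1 +
      (if 20 ≤ M then 1 + (if 25 ≤ M then 1 + (if 50 ≤ M then 1 + (if 75 ≤ M then 1 +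
      (if 100 ≤ M then 1 + (0 : Int) else 0) else 0) else 0) else 0) else 0) else 0) else 0) else 0) else 0)
    = getCapacityLink M := by
  rw [pvLink_def]
  by_cases h1 : M < 2
  · simp [h1, show ¬(2 : Int) ≤ M by omega]
  by_cases h2 : M < 5
  · simp [h1, h2, show (2 : Int) ≤ M by omega, show ¬(5 : Int) ≤ M by omega]
  by_cases h3 : M < 10
  · simp [h1, h2, h3, show (2 : Int) ≤ M by omega, show (5 : Int) ≤ M by omega, show ¬(10 : Int) ≤ M by omega]
  by_cases h4 : M < 15
  · simp [h1, h2, h3, h4, show (2 : Int) ≤ M by omega, show (5 : Int) ≤ M by omega, show (10 : Int) ≤ M by omega, show ¬(15 : Int) ≤ M by omega]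
  by_cases h5 : M < 20
  · simp [h1, h2, h3, h4, h5, show (2 : Int) ≤ M by omega, show (5 : Int) ≤ M by omega, show (10 : Int) ≤ M by omega, show (15 : Int) ≤ M by omega, show ¬(20 : Int) ≤ M by omega]
  by_cases h6 : M < 25
  · simp [h1, h2, h3, h4, h5, h6, show (2 : Int) ≤ M by omega, show (5 : Int) ≤ M by omega, show (10 : Int) ≤ M by omega, show (15 : Int) ≤ M by omega, show (20 : Int) ≤ M by omega, show ¬(25 : Int) ≤ M by omega]
  by_cases h7 : M < 50
  · simp [h1, h2, h3, h4, h5, h6, h7, show (2 : Int) ≤ M by omega, show (5 : Int) ≤ M by omega, show (10 : Int) ≤ M by omega, show (15 : Int) ≤ M by omega, show (20 : Int) ≤ M by omega, show (25 : Int) ≤ M by omega, show ¬(50 : Int) ≤ M by omega]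
  by_cases h8 : M < 75
  · simp [h1, h2, h3, h4, h5, h6, h7, h8, show (2 : Int) ≤ M by omega, show (5 : Int) ≤ M by omega, show (10 : Int) ≤ M by omega, show (15 : Int) ≤ M by omega, show (20 : Int) ≤ M by omega, show (25 : Int) ≤ M by omega, show (50 : Int) ≤ M by omega, show ¬(75 : Int) ≤ M by omega]
  by_cases h9 : M < 100
  · simp [h1, h2, h3, h4, h5, h6, h7, h8, h9, show (2 : Int) ≤ M by omega, show (5 : Int) ≤ M by omega, show (10 : Int) ≤ M by omega, show (15 : Int) ≤ M by omega, show (20 : Int) ≤ M by omega, show (25 : Int) ≤ M by omega, show (50 : Int) ≤ M by omega, show (75 : Int) ≤ M by omega, show ¬(100 : Int) ≤ M by omega]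
  · simp [h1, h2, h3, h4, h5, h6, h7, h8, h9, show (2 : Int) ≤ M by omega, show (5 : Int) ≤ M by omega, show (10 : Int) ≤ M by omega, show (15 : Int) ≤ M by omega, show (20 : Int) ≤ M by omega, show (25 : Int) ≤ M by omega, show (50 : Int) ≤ M by omega, show (75 : Int) ≤ M by omega, show (100 : Int) ≤ M by omega, show (100 : Int) ≤ M by omega]

-- ===== VERDICT (by name: the statement is the Claim_ definition above) =====
theorem findCapacityPrice_spec : Claim_equal_findCapacityPrice := by
  intro cs caps _ _
  unfold Spec_findCapacityPrice findCapacityPrice findCapacityPrice_alt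
  rw [pvStep_eq_max]
  have hwalk : pvTierWalk cs [2, 5, 10, 15, 20, 25, 50, 75, 100]
      = getCapacityLink (pvCapacityOf cs) := by
    rw [pvWalk_cons, pvWalk_cons, pvWalk_cons, pvWalk_cons, pvWalk_cons, pvWalk_cons,
        pvWalk_cons, pvWalk_cons, pvWalk_cons, pvWalk_nil]
    rw [pvAny_eq 2 (by norm_num), pvAny_eq 5 (by norm_num), pvAny_eq 10 (by norm_num),
        pvAny_eq 15 (by norm_num), pvAny_eq 20 (by norm_num), pvAny_eq 25 (by norm_num),
        pvAny_eq 50 (by norm_num), pvAny_eq 75 (by norm_num), pvAny_eq 100 (by norm_num)]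
    simp only [decide_eq_true_eq]
    exact pvChain_eq_link (pvCapacityOf cs)
  rw [hwalk]
  rfl
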